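-- pv_equiv track=rewrite | github.com/Sent1nelDNoir/lvl329_python | BasicPython.py | comfortable_word
-- ===== SOURCE A (Python) =====
-- def comfortable_word(word):
--     Left = "qwertasdfgzxcvb"
--     Right = "yuiophjklnm"
--     last = None
--     for l in word:
--         if l in Left:
--             if last == "L": return False
--             last = "L"
--         elif l in Right:
--             if last == "R": return False
--             last = "R"
--     return True
-- ===== SOURCE B (Python) =====
-- def comfortable_word(word):
--     Left = "qwertasdfgzxcvb"
--     Right = "yuiophjklnm"
--     hands = "".join("L" if c in Left else "R" for c in word if c in Left or c in Right)
--     return "LL" not in hands and "RR" not in hands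
-- ===== Notes on version B (the rewrite author's own statement) =====
-- stated objective: alternative
-- what changed: Replaces A's early-return last-hand state machine by a forbidden-pattern formulation: build the word's hand string (one letter per keyboard character, other characters dropped) and declare the word comfortable iff no doubled hand letter occurs as a substring.
import Mathlib
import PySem

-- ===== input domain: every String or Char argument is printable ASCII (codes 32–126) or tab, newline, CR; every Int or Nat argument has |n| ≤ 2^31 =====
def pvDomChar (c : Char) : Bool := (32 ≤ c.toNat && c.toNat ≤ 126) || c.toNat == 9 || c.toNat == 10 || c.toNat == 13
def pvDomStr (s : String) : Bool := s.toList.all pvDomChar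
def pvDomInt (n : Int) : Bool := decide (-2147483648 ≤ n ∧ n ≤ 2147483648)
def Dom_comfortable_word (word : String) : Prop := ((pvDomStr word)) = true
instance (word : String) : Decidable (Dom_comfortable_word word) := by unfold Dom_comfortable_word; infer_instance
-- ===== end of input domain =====

-- B replaces A's early-return last-hand state machine by a forbidden-pattern formulation:
-- build the word's hand string and test that no doubled hand letter occurs as a substring; objective: alternative.

-- ===== PORT A =====
-- the keyboard halves; 'l in Left' on a single char is membership in the string's characters
def cwLeft : List Char := "qwertasdfgzxcvb".toList
def cwRight : List Char := "yuiophjklnm".toList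

-- A's for-loop with early return, state 'last : Option String'
def cwLoop : List Char → Option String → Bool
  | [], _ => true
  | l :: rest, last =>
      if cwLeft.contains l then
        if last = some "L" then false else cwLoop rest (some "L")
      else if cwRight.contains l then
        if last = some "R" then false else cwLoop rest (some "R")
      else cwLoop rest last

def comfortable_word (word : String) : Bool :=
  cwLoop word.toList none

-- ===== PORT B =====
-- hands = "".join("L" if c in Left else "R" for c in word if c in Left or c in Right)
def cwHands (word : String) : String :=
  String.ofList ((word.toList.filter (fun c => cwLeft.contains c || cwRight.contains c)).map
    (fun c => if cwLeft.contains c then 'L' else 'R'))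

-- "LL" not in hands and "RR" not in hands
def comfortable_word_alt (word : String) : Bool :=
  let hands := cwHands word
  !(PySem.Str.isIn "LL" hands) && !(PySem.Str.isIn "RR" hands)

-- ===== PRECONDITION & SPEC =====
def Spec_comfortable_word (word : String) (out : Bool) : Prop := out = comfortable_word_alt word
instance (word : String) (out : Bool) : Decidable (Spec_comfortable_word word out) := by unfold Spec_comfortable_word; infer_instance

-- ===== CLAIM (what is proved, stated in full; the proofs are below) =====
def Claim_equal_comfortable_word : Prop := ∀ (word : String), Dom_comfortable_word word → Spec_comfortable_word word (comfortable_word word)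

-- ===== LEMMAS AND PROOFS =====

-- hand sequence of a raw char list (the char list under cwHands)
def cwHandsL (cs : List Char) : List Char :=
  (cs.filter (fun c => cwLeft.contains c || cwRight.contains c)).map
    (fun c => if cwLeft.contains c then 'L' else 'R')

-- adjacent-pair check, proof-side characterisation of "no equal neighbours"
def cwAdj : List Char → Bool
  | a :: b :: t => (a != b) && cwAdj (b :: t)
  | _ => true

-- encode A's 'last' state as the char it would contribute
def cwLastChars : Option String → List Char
  | none => []
  | some s => [if s = "L" then 'L' else 'R']

lemma cwAdj_cons_ne {h x : Char} (t : List Char) (hne : h ≠ x) :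
    cwAdj (h :: x :: t) = cwAdj (x :: t) := by
  simp [cwAdj, bne_iff_ne, hne]

-- loop invariant: A's loop from a reachable state 'last' checks adjacency of lastChars ++ hands
lemma cwLoop_eq (cs : List Char) (last : Option String)
    (hst : last = none ∨ last = some "L" ∨ last = some "R") :
    cwLoop cs last = cwAdj (cwLastChars last ++ cwHandsL cs) := by
  induction cs generalizing last with
  | nil =>
      rcases hst with h | h | h <;> subst h <;> rfl
  | cons c rest ih =>
      by_cases hL : c ∈ cwLeft
      · have hh : cwHandsL (c :: rest) = 'L' :: cwHandsL rest := by
          simp [cwHandsL, hL]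
        by_cases he : last = some "L"
        · subst he
          simp [cwLoop, hL, hh, cwLastChars, cwAdj]
        · have h1 : cwLoop (c :: rest) last = cwLoop rest (some "L") := by
            simp [cwLoop, hL, he]
          rw [h1, ih (some "L") (Or.inr (Or.inl rfl)), hh]
          rcases hst with h | h | h <;> subst h
          · rfl
          · exact absurd rfl he
          · simpa [cwLastChars] using (cwAdj_cons_ne (cwHandsL rest) (by decide)).symm
      · by_cases hR : c ∈ cwRight
        · have hh : cwHandsL (c :: rest) = 'R' :: cwHandsL rest := by
            simp [cwHandsL, hL, hR]
          by_cases he : last = some "R"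
          · subst he
            simp [cwLoop, hL, hR, hh, cwLastChars, cwAdj]
          · have h1 : cwLoop (c :: rest) last = cwLoop rest (some "R") := by
              simp [cwLoop, hL, hR, he]
            rw [h1, ih (some "R") (Or.inr (Or.inr rfl)), hh]
            rcases hst with h | h | h <;> subst h
            · rfl
            · simpa [cwLastChars] using (cwAdj_cons_ne (cwHandsL rest) (by decide)).symm
            · exact absurd rfl he
        · have hh : cwHandsL (c :: rest) = cwHandsL rest := by
            simp [cwHandsL, hL, hR]
          have h1 : cwLoop (c :: rest) last = cwLoop rest last := by
            simp [cwLoop, hL, hR]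
          rw [h1, ih last hst, hh]

-- a length-2 pattern is an infix of x :: y :: t iff it matches at the head or occurs in y :: t
lemma pair_infix_cons (a b x y : Char) (t : List Char) :
    [a, b] <:+: x :: y :: t ↔ (x = a ∧ y = b) ∨ [a, b] <:+: y :: t := by
  rw [List.infix_cons_iff]
  constructor
  · rintro (hp | hi)
    · obtain ⟨u, hu⟩ := hp
      injection hu with h1 h2
      injection h2 with h3 _
      exact Or.inl ⟨h1.symm, h3.symm⟩
    · exact Or.inr hi
  · rintro (⟨rfl, rfl⟩ | hi)
    · exact Or.inl ⟨t, rfl⟩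
    · exact Or.inr hi

lemma pair_not_infix_short (a b x : Char) : ¬ ([a, b] <:+: [x]) := by
  rintro ⟨s, t, h⟩
  cases s <;> simp_all

-- over the alphabet {'L','R'}, "no LL and no RR infix" is exactly the adjacency check
lemma cwAdj_iff_no_pairs (l : List Char) (hl : ∀ x ∈ l, x = 'L' ∨ x = 'R') :
    cwAdj l = true ↔ ¬ (['L', 'L'] <:+: l) ∧ ¬ (['R', 'R'] <:+: l) := by
  induction l with
  | nil => simp [cwAdj]
  | cons x t ih =>
      match t with
      | [] =>
          simp [cwAdj, pair_not_infix_short]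
      | y :: t =>
          have hx := hl x (by simp)
          have hy := hl y (by simp)
          have iht := ih (fun z hz => hl z (by simp [hz]))
          simp only [cwAdj, Bool.and_eq_true, bne_iff_ne]
          rw [pair_infix_cons, pair_infix_cons, iht]
          rcases hx with rfl | rfl <;> rcases hy with rfl | rfl <;> simp

lemma cwHandsL_alphabet (cs : List Char) : ∀ x ∈ cwHandsL cs, x = 'L' ∨ x = 'R' := by
  intro x hx
  simp only [cwHandsL, List.mem_map] at hx
  obtain ⟨c, _, rfl⟩ := hx
  split_ifs <;> simp

-- ===== VERDICT (by name: the statement is the Claim_ definition above) =====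
theorem comfortable_word_spec : Claim_equal_comfortable_word := by
  intro word _
  show comfortable_word word = comfortable_word_alt word
  rw [comfortable_word, cwLoop_eq _ none (Or.inl rfl)]
  have hto : (cwHands word).toList = cwHandsL word.toList := by
    simp [cwHands, cwHandsL]
  rw [Bool.eq_iff_iff]
  rw [show cwLastChars none ++ cwHandsL word.toList = cwHandsL word.toList from rfl]
  rw [cwAdj_iff_no_pairs _ (cwHandsL_alphabet word.toList)]
  simp only [comfortable_word_alt, Bool.and_eq_true, Bool.not_eq_true',
    ← Bool.not_eq_true, PySem.Str.isIn_iff_infix, hto]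
  constructor
  · rintro ⟨h1, h2⟩
    exact ⟨fun hc => h1 (by simpa using hc), fun hc => h2 (by simpa using hc)⟩
  · rintro ⟨h1, h2⟩
    exact ⟨fun hc => h1 (by simpa using hc), fun hc => h2 (by simpa using hc)⟩
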